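-- pv_equiv track=rewrite | github.com/alpha4000-Space/New-repos | handlers.py | _paginate_order_blocks
-- ===== SOURCE A (Python) =====
-- def _paginate_order_blocks(blocks: list[str], lang: str, first_title: str) -> list[str]:
--     if not blocks:
--         return [first_title]
--     sep = "\n\n——————————\n\n"
--     pages: list[str] = []
--     current_blocks: list[str] = []
--     current_len = 0
--     limit = 3800
--     for block in blocks:
--         add = len(block) + (len(sep) if current_blocks else 0)
--         if current_blocks and (current_len + add) > limit:
--             prefix = first_title if not pages else ("🔄 Davomi:" if lang == "uz" else "🔄 Продолжение:")
--             pages.append(prefix + "\n\n" + sep.join(current_blocks))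
--             current_blocks = [block]
--             current_len = len(block)
--         else:
--             current_blocks.append(block)
--             current_len += add
--     if current_blocks:
--         prefix = first_title if not pages else ("🔄 Davomi:" if lang == "uz" else "🔄 Продолжение:")
--         pages.append(prefix + "\n\n" + sep.join(current_blocks))
--     return pages
-- ===== SOURCE B (Python) =====
-- def _paginate_order_blocks(blocks: list[str], lang: str, first_title: str) -> list[str]:
--     sep = "\n\n——————————\n\n"
--     limit = 3800
--     n = len(blocks)
--     # Prefix table: Q[j] = sum(len(b) + len(sep) for b in blocks[:j]).
--     # A page blocks[i:j] (j > i) costs Q[j] - Q[i] - len(sep), so it fits iff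
--     # Q[j] <= Q[i] + len(sep) + limit; Q is strictly increasing, so the page
--     # boundary is found by binary search instead of scanning block by block.
--     Q = [0]
--     for b in blocks:
--         Q.append(Q[-1] + len(b) + len(sep))
--     cuts = []
--     i = 0
--     while i < n:
--         bound = Q[i] + len(sep) + limit
--         lo, hi = i + 1, n
--         while lo < hi:
--             mid = (lo + hi + 1) // 2
--             if Q[mid] <= bound:
--                 lo = mid
--             else:
--                 hi = mid - 1
--         cuts.append((i, lo))
--         i = lo
--     if not cuts:
--         return [first_title]
--     cont = "🔄 Davomi:" if lang == "uz" else "🔄 Продолжение:"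
--     return [(first_title if k == 0 else cont) + "\n\n" + sep.join(blocks[a:b])
--             for k, (a, b) in enumerate(cuts)]
-- ===== Notes on version B (the rewrite author's own statement) =====
-- stated objective: alternative
-- what changed: B builds a prefix-sum table of block costs once and finds each page boundary by binary search over it (then renders all pages in one enumerate pass), instead of A's single greedy loop that grows the current page block by block and formats pages inline.
import Mathlib
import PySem

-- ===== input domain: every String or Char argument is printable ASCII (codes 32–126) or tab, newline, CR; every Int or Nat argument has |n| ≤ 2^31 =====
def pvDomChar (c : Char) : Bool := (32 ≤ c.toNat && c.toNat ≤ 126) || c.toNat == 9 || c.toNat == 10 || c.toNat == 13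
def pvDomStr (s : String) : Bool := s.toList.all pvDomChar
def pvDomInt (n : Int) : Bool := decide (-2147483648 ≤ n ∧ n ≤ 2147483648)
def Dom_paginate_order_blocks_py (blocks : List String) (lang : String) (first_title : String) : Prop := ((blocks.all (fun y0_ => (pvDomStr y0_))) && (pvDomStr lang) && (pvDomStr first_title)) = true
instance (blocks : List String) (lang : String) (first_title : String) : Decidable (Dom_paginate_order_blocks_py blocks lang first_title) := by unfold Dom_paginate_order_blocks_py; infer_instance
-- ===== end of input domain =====

-- B replaces A's greedy block-by-block loop with a prefix-sum table and a binary
-- search for each page boundary; objective: alternative algorithm, same result.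

def pvSep : String := "\n\n——————————\n\n"

-- ===== PORT A =====
-- literal transliteration of A: one loop carrying (pages, current_blocks, current_len),
-- formatting each page inside the loop, plus the trailing flush.
def pvPrefixA (pages : List String) (lang first_title : String) : String :=
  if pages = [] then first_title
  else if lang = "uz" then "🔄 Davomi:" else "🔄 Продолжение:"

def pvLoopA (lang first_title : String) (st : List String × List String × Int) :
    List String → List String × List String × Int
  | [] => st
  | b :: bs =>
    if st.2.1 ≠ [] ∧ st.2.2 + (PySem.Str.len b + (if st.2.1 ≠ [] then PySem.Str.len pvSep else 0)) > 3800 then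
      pvLoopA lang first_title
        (st.1 ++ [pvPrefixA st.1 lang first_title ++ "\n\n" ++ PySem.Str.join pvSep st.2.1],
         [b], PySem.Str.len b) bs
    else
      pvLoopA lang first_title
        (st.1, st.2.1 ++ [b],
         st.2.2 + (PySem.Str.len b + (if st.2.1 ≠ [] then PySem.Str.len pvSep else 0))) bs

def paginate_order_blocks_py (blocks : List String) (lang : String) (first_title : String) : List String :=
  if blocks = [] then [first_title]
  else
    let st := pvLoopA lang first_title ([], [], 0) blocks
    if st.2.1 ≠ [] then
      st.1 ++ [pvPrefixA st.1 lang first_title ++ "\n\n" ++ PySem.Str.join pvSep st.2.1]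
    else st.1

-- ===== PORT B =====
-- transliteration of Source B: prefix table Q (built by the appending loop), a hand-rolled
-- last-true binary search per page boundary (Source B may not import bisect since A imports
-- nothing), the cut-collecting while loop, then one rendering pass over the cuts.
def pvQ (blocks : List String) : List Int :=
  blocks.foldl (fun acc b => acc ++ [acc.getLast! + PySem.Str.len b + PySem.Str.len pvSep]) [(0 : Int)]

def pvBS (Q : List Int) (bound : Int) : Nat → Nat → Nat → Nat
  | 0, lo, _hi => lo
  | fuel + 1, lo, hi =>
    if lo < hi then
      let mid := (lo + hi + 1) / 2
      if Q.getD mid 0 ≤ bound then pvBS Q bound fuel mid hi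
      else pvBS Q bound fuel lo (mid - 1)
    else lo

def pvCuts (Q : List Int) (n : Nat) : Nat → Nat → List (Nat × Nat)
  | 0, _i => []
  | fuel + 1, i =>
    if i < n then
      let j := pvBS Q (Q.getD i 0 + PySem.Str.len pvSep + 3800) (n - (i + 1)) (i + 1) n
      (i, j) :: pvCuts Q n fuel j
    else []

def paginate_order_blocks_py_alt (blocks : List String) (lang : String) (first_title : String) : List String :=
  let Q := pvQ blocks
  let cuts := pvCuts Q blocks.length blocks.length 0
  if cuts = [] then [first_title]
  else
    (PySem.List.enumerate cuts 0).map
      (fun p => (if p.1 = 0 then first_title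
                 else if lang = "uz" then "🔄 Davomi:" else "🔄 Продолжение:") ++
                "\n\n" ++
                PySem.Str.join pvSep
                  (PySem.List.slice blocks (some (p.2.1 : Int)) (some (p.2.2 : Int))))

-- ===== PRECONDITION & SPEC =====
def Spec_paginate_order_blocks_py (blocks : List String) (lang : String) (first_title : String) (out : List String) : Prop := out = paginate_order_blocks_py_alt blocks lang first_title
instance (blocks : List String) (lang : String) (first_title : String) (out : List String) : Decidable (Spec_paginate_order_blocks_py blocks lang first_title out) := by unfold Spec_paginate_order_blocks_py; infer_instance

-- ===== CLAIM (what is proved, stated in full; the proofs are below) =====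
def Claim_equal_paginate_order_blocks_py : Prop := ∀ (blocks : List String) (lang : String) (first_title : String), Dom_paginate_order_blocks_py blocks lang first_title → Spec_paginate_order_blocks_py blocks lang first_title (paginate_order_blocks_py blocks lang first_title)

-- ===== LEMMAS AND PROOFS =====

-- proof-side model: the greedy chunking into groups of blocks that both programs realise
def pvCost (xs : List String) : Int := (xs.map (fun b => PySem.Str.len b + PySem.Str.len pvSep)).sum

def pvFit (l : Int) : List String → Nat
  | [] => 0
  | b :: bs =>
    if l + (PySem.Str.len b + PySem.Str.len pvSep) ≤ 3800 then
      pvFit (l + (PySem.Str.len b + PySem.Str.len pvSep)) bs + 1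
    else 0

def pvLoopB (st : List (List String) × List String × Int) :
    List String → List (List String) × List String × Int
  | [] => st
  | b :: bs =>
    if st.2.1 ≠ [] ∧ st.2.2 + (PySem.Str.len b + (if st.2.1 ≠ [] then PySem.Str.len pvSep else 0)) > 3800 then
      pvLoopB (st.1 ++ [st.2.1], [b], PySem.Str.len b) bs
    else
      pvLoopB (st.1, st.2.1 ++ [b],
        st.2.2 + (PySem.Str.len b + (if st.2.1 ≠ [] then PySem.Str.len pvSep else 0))) bs

def pvChunk (blocks : List String) : List (List String) :=
  let st := pvLoopB ([], [], 0) blocks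
  if st.2.1 ≠ [] then st.1 ++ [st.2.1] else st.1

def pvRender (lang first_title : String) (groups : List (List String)) : List String :=
  (PySem.List.enumerate groups 0).map
    (fun p => (if p.1 = 0 then first_title
               else if lang = "uz" then "🔄 Davomi:" else "🔄 Продолжение:") ++
              "\n\n" ++ PySem.Str.join pvSep p.2)

theorem pvRender_eq_nil_iff (lang first_title : String) (gs : List (List String)) :
    pvRender lang first_title gs = [] ↔ gs = [] := by
  simp [pvRender, PySem.List.enumerate_eq_zipIdx_map]

theorem pvRender_append (lang first_title : String) (gs : List (List String)) (g : List String) :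
    pvRender lang first_title (gs ++ [g]) =
      pvRender lang first_title gs ++
        [pvPrefixA (pvRender lang first_title gs) lang first_title ++ "\n\n" ++ PySem.Str.join pvSep g] := by
  have hif : pvPrefixA (pvRender lang first_title gs) lang first_title =
      if gs = [] then first_title else if lang = "uz" then "🔄 Davomi:" else "🔄 Продолжение:" := by
    rw [pvPrefixA]
    by_cases hgs : gs = [] <;>
      simp [hgs, pvRender_eq_nil_iff]
  rw [hif]
  rcases gs with _ | ⟨g0, gs'⟩
  · simp [pvRender, PySem.List.enumerate_cons]
  · simp only [pvRender, PySem.List.enumerate_append, List.map_append,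
      PySem.List.enumerate_cons, PySem.List.enumerate_nil, List.map_cons, List.map_nil]
    norm_num
    rw [if_neg (by omega : ¬ ((gs'.length : Int) + 1 = 0)), if_neg (by simp : ¬ (g0 :: gs' = []))]

-- A's loop runs in lockstep with the greedy chunking loop
theorem pv_loop_rel (lang first_title : String) (bs : List String)
    (gs : List (List String)) (c : List String) (l : Int) :
    pvLoopA lang first_title (pvRender lang first_title gs, c, l) bs =
      ((pvRender lang first_title (pvLoopB (gs, c, l) bs).1),
       (pvLoopB (gs, c, l) bs).2.1, (pvLoopB (gs, c, l) bs).2.2) := by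
  induction bs generalizing gs c l with
  | nil => simp [pvLoopA, pvLoopB]
  | cons b bs ih =>
    rw [pvLoopA, pvLoopB]
    by_cases h : c ≠ [] ∧ l + (PySem.Str.len b + (if c ≠ [] then PySem.Str.len pvSep else 0)) > (3800 : Int)
    · rw [if_pos h, if_pos h, ← pvRender_append]
      exact ih (gs ++ [c]) [b] (PySem.Str.len b)
    · rw [if_neg h, if_neg h]
      exact ih gs (c ++ [b]) _

theorem pv_loop_cur_ne_nil (bs : List String)
    (gs : List (List String)) (c : List String) (hc : c ≠ []) (l : Int) :
    (pvLoopB (gs, c, l) bs).2.1 ≠ [] := by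
  induction bs generalizing gs c l with
  | nil => exact hc
  | cons b bs ih =>
    rw [pvLoopB]
    by_cases h : c ≠ [] ∧ l + (PySem.Str.len b + (if c ≠ [] then PySem.Str.len pvSep else 0)) > (3800 : Int)
    · rw [if_pos h]; exact ih _ [b] (by simp) _
    · rw [if_neg h]; exact ih _ (c ++ [b]) (by simp) _

theorem pvChunk_cons (b : String) (bs : List String) :
    pvChunk (b :: bs) =
      (pvLoopB ([], [b], (b.length : Int)) bs).1 ++ [(pvLoopB ([], [b], (b.length : Int)) bs).2.1] := by
  have hstep : ¬ (([] : List String) ≠ [] ∧ (0 : Int) + (PySem.Str.len b + (if ([] : List String) ≠ [] then PySem.Str.len pvSep else 0)) > 3800) := by simp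
  simp only [pvChunk, pvLoopB, if_neg hstep]
  norm_num
  exact pv_loop_cur_ne_nil bs [] [b] (by simp) ((b.length : Int))

theorem pvA_cons (lang first_title b : String) (bs : List String) :
    paginate_order_blocks_py (b :: bs) lang first_title =
      pvRender lang first_title (pvChunk (b :: bs)) := by
  have hstep : ¬ (([] : List String) ≠ [] ∧ (0 : Int) + (PySem.Str.len b + (if ([] : List String) ≠ [] then PySem.Str.len pvSep else 0)) > 3800) := by simp
  have hne := pv_loop_cur_ne_nil bs [] [b] (by simp) ((b.length : Int))
  have hrel := pv_loop_rel lang first_title bs [] [b] ((b.length : Int))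
  have hren : pvRender lang first_title [] = [] := by simp [pvRender]
  rw [hren] at hrel
  simp only [paginate_order_blocks_py, if_neg (by simp : ¬ (b :: bs = [])), pvLoopA, if_neg hstep]
  norm_num
  rw [hrel, pvChunk_cons, pvRender_append]
  rw [if_neg (show ¬ ((pvRender lang first_title (pvLoopB ([], [b], (b.length : Int)) bs).1,
        (pvLoopB ([], [b], (b.length : Int)) bs).2.1,
        (pvLoopB ([], [b], (b.length : Int)) bs).2.2).2.1 = []) from hne)]

-- ---- cost arithmetic ----

theorem pvCost_nonneg (xs : List String) : 0 ≤ pvCost xs := by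
  apply List.sum_nonneg
  intro x hx
  simp only [List.mem_map] at hx
  obtain ⟨b, _, rfl⟩ := hx
  have h1 : (0 : Int) ≤ PySem.Str.len b := by simp [PySem.Str.len_eq]
  have h2 : (0 : Int) ≤ PySem.Str.len pvSep := by simp [PySem.Str.len_eq]
  omega

-- ---- the greedy group length, characterised ----

theorem pvFit_le_length (l : Int) (bs : List String) : pvFit l bs ≤ bs.length := by
  induction bs generalizing l with
  | nil => simp [pvFit]
  | cons b bs ih =>
    rw [pvFit]
    split
    · simpa using Nat.succ_le_succ (ih _)
    · simp

theorem pvFit_ge (l : Int) (bs : List String) (m : Nat) (hm : m ≤ bs.length)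
    (h : l + pvCost (bs.take m) ≤ 3800) : m ≤ pvFit l bs := by
  induction bs generalizing l m with
  | nil =>
    simp only [List.length_nil, Nat.le_zero] at hm
    subst hm
    exact Nat.zero_le _
  | cons b bs ih =>
    cases m with
    | zero => omega
    | succ m' =>
      have hcost : pvCost ((b :: bs).take (m' + 1)) = (PySem.Str.len b + PySem.Str.len pvSep) + pvCost (bs.take m') := by
        simp [pvCost]
      rw [hcost] at h
      have hrest := pvCost_nonneg (bs.take m')
      have hfit : l + (PySem.Str.len b + PySem.Str.len pvSep) ≤ 3800 := by omega
      rw [pvFit, if_pos hfit]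
      have := ih (l + (PySem.Str.len b + PySem.Str.len pvSep)) m' (by simpa using hm) (by omega)
      omega

theorem pvFit_fits (l : Int) (bs : List String) (m : Nat) (hm1 : 1 ≤ m) (hm : m ≤ pvFit l bs) :
    l + pvCost (bs.take m) ≤ 3800 := by
  induction bs generalizing l m with
  | nil =>
    have : pvFit l [] = 0 := rfl
    omega
  | cons b bs ih =>
    rw [pvFit] at hm
    by_cases hfit : l + (PySem.Str.len b + PySem.Str.len pvSep) ≤ 3800
    · rw [if_pos hfit] at hm
      cases m with
      | zero => omega
      | succ m' =>
        have hcost : pvCost ((b :: bs).take (m' + 1)) = (PySem.Str.len b + PySem.Str.len pvSep) + pvCost (bs.take m') := by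
          simp [pvCost]
        rw [hcost]
        cases Nat.eq_zero_or_pos m' with
        | inl h0 =>
          subst h0
          have : pvCost (bs.take 0) = 0 := by simp [pvCost]
          omega
        | inr hpos =>
          have := ih (l + (PySem.Str.len b + PySem.Str.len pvSep)) m' hpos (by omega)
          omega
    · rw [if_neg hfit] at hm; omega

-- ---- the greedy chunking, characterised by pvFit ----

theorem pvLoopB_all_fit (bs : List String) (gs : List (List String)) (c : List String)
    (hc : c ≠ []) (l : Int) (hfit : pvFit l bs = bs.length) :
    pvLoopB (gs, c, l) bs = (gs, c ++ bs, l + pvCost bs) := by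
  induction bs generalizing gs c l with
  | nil => simp [pvLoopB, pvCost]
  | cons b bs ih =>
    rw [pvFit] at hfit
    by_cases hf : l + (PySem.Str.len b + PySem.Str.len pvSep) ≤ 3800
    · rw [if_pos hf] at hfit
      have hstep : pvLoopB (gs, c, l) (b :: bs) =
          pvLoopB (gs, c ++ [b], l + (PySem.Str.len b + PySem.Str.len pvSep)) bs := by
        rw [pvLoopB, if_neg (by simp [hc, PySem.Str.len_eq] at hf ⊢; omega)]
        simp [hc]
      rw [hstep, ih gs (c ++ [b]) (by simp) _ (by simpa using hfit)]
      have hco : pvCost (b :: bs) = (PySem.Str.len b + PySem.Str.len pvSep) + pvCost bs := by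
        simp [pvCost]
      rw [hco]
      simp only [Prod.mk.injEq, true_and]
      exact ⟨by simp, by ring⟩
    · rw [if_neg hf] at hfit
      simp at hfit

theorem pvLoopB_partial (bs : List String) (gs : List (List String)) (c : List String)
    (hc : c ≠ []) (l : Int) (b' : String) (rest : List String)
    (hd : bs.drop (pvFit l bs) = b' :: rest) :
    pvLoopB (gs, c, l) bs =
      pvLoopB (gs ++ [c ++ bs.take (pvFit l bs)], [b'], PySem.Str.len b') rest := by
  induction bs generalizing gs c l with
  | nil => simp [pvFit] at hd
  | cons b bs ih =>
    rw [pvFit] at hd ⊢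
    by_cases hf : l + (PySem.Str.len b + PySem.Str.len pvSep) ≤ 3800
    · rw [if_pos hf] at hd ⊢
      have hstep : pvLoopB (gs, c, l) (b :: bs) =
          pvLoopB (gs, c ++ [b], l + (PySem.Str.len b + PySem.Str.len pvSep)) bs := by
        rw [pvLoopB, if_neg (by simp [hc, PySem.Str.len_eq] at hf ⊢; omega)]
        simp [hc]
      rw [hstep, ih gs (c ++ [b]) (by simp) _ (by simpa using hd)]
      simp
    · rw [if_neg hf] at hd ⊢
      simp only [List.drop_zero] at hd
      injection hd with h1 h2
      subst h1; subst h2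
      have hcond : c ≠ [] ∧ l + (PySem.Str.len b + (if c ≠ [] then PySem.Str.len pvSep else 0)) > (3800 : Int) := by
        refine ⟨hc, ?_⟩
        rw [if_pos hc]
        omega
      rw [pvLoopB, if_pos (by simpa using hcond)]
      simp

theorem pvLoopB_prefix (bs : List String) (gs0 gs : List (List String)) (c : List String) (l : Int) :
    pvLoopB (gs0 ++ gs, c, l) bs = (gs0 ++ (pvLoopB (gs, c, l) bs).1, (pvLoopB (gs, c, l) bs).2) := by
  induction bs generalizing gs c l with
  | nil => simp [pvLoopB]
  | cons b bs ih =>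
    rw [pvLoopB, pvLoopB]
    by_cases h : c ≠ [] ∧ l + (PySem.Str.len b + (if c ≠ [] then PySem.Str.len pvSep else 0)) > (3800 : Int)
    · rw [if_pos h, if_pos h, List.append_assoc]
      exact ih (gs ++ [c]) [b] _
    · rw [if_neg h, if_neg h]
      exact ih gs (c ++ [b]) _

theorem pvChunk_nil : pvChunk [] = [] := by simp [pvChunk, pvLoopB]

theorem pvChunk_start (b : String) (bs : List String) :
    pvChunk (b :: bs) =
      (if (pvLoopB ([], [b], PySem.Str.len b) bs).2.1 ≠ []
       then (pvLoopB ([], [b], PySem.Str.len b) bs).1 ++ [(pvLoopB ([], [b], PySem.Str.len b) bs).2.1]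
       else (pvLoopB ([], [b], PySem.Str.len b) bs).1) := by
  have hstep : ¬ (([] : List String) ≠ [] ∧ (0 : Int) + (PySem.Str.len b + (if ([] : List String) ≠ [] then PySem.Str.len pvSep else 0)) > 3800) := by simp
  simp only [pvChunk, pvLoopB, if_neg hstep]
  norm_num

theorem pvChunk_eq (b : String) (bs : List String) :
    pvChunk (b :: bs) =
      (b :: bs.take (pvFit (PySem.Str.len b) bs)) :: pvChunk (bs.drop (pvFit (PySem.Str.len b) bs)) := by
  rcases hd : bs.drop (pvFit (PySem.Str.len b) bs) with _ | ⟨b', rest⟩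
  · -- everything fits in one group
    have hk : pvFit (PySem.Str.len b) bs = bs.length := by
      have h1 := pvFit_le_length (PySem.Str.len b) bs
      have h2 := List.drop_eq_nil_iff.mp hd
      omega
    rw [pvChunk_start, pvLoopB_all_fit bs [] [b] (by simp) _ hk, hk, List.take_length]
    simp [pvChunk_nil]
  · rw [pvChunk_start, pvLoopB_partial bs [] [b] (by simp) _ b' rest hd]
    simp only [List.nil_append, List.singleton_append]
    have hpre := pvLoopB_prefix rest [b :: bs.take (pvFit (PySem.Str.len b) bs)] [] [b'] (PySem.Str.len b')
    rw [List.append_nil] at hpre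
    have hne := pv_loop_cur_ne_nil rest [] [b'] (by simp) (PySem.Str.len b')
    rw [hpre, pvChunk_start, if_pos hne, if_pos hne]
    simp

-- ---- the prefix table Q, characterised ----

theorem pv_getLast_concat (acc : List Int) (x : Int) : (acc ++ [x]).getLast! = x := by
  induction acc with
  | nil => rfl
  | cons a as ih =>
    cases as with
    | nil => rfl
    | cons b bs => exact ih

def pvQtail (q : Int) : List String → List Int
  | [] => []
  | b :: bs => (q + PySem.Str.len b + PySem.Str.len pvSep) :: pvQtail (q + PySem.Str.len b + PySem.Str.len pvSep) bs

theorem pvQ_foldl (bs : List String) : ∀ (acc : List Int), acc ≠ [] →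
    bs.foldl (fun acc b => acc ++ [acc.getLast! + PySem.Str.len b + PySem.Str.len pvSep]) acc
      = acc ++ pvQtail acc.getLast! bs := by
  induction bs with
  | nil => intro acc _; simp [pvQtail]
  | cons b bs ih =>
    intro acc hacc
    rw [List.foldl_cons, ih _ (by simp)]
    rw [pv_getLast_concat acc _]
    simp [pvQtail]

theorem pvQ_eq (blocks : List String) : pvQ blocks = 0 :: pvQtail 0 blocks := by
  rw [pvQ, pvQ_foldl blocks [0] (by simp)]
  rfl

theorem pvQtail_getD (bs : List String) : ∀ (q : Int) (j : Nat), j < bs.length →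
    (pvQtail q bs).getD j 0 = q + pvCost (bs.take (j + 1)) := by
  induction bs with
  | nil => intro q j h; simp at h
  | cons b bs ih =>
    intro q j hj
    cases j with
    | zero => simp [pvQtail, pvCost]; omega
    | succ j' =>
      rw [pvQtail]
      simp only [List.getD_cons_succ]
      rw [ih _ j' (by simpa using hj)]
      have : pvCost ((b :: bs).take (j' + 1 + 1)) = (PySem.Str.len b + PySem.Str.len pvSep) + pvCost (bs.take (j' + 1)) := by
        simp [pvCost]
      rw [this]; omega

theorem pvQ_getD (blocks : List String) (j : Nat) (hj : j ≤ blocks.length) :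
    (pvQ blocks).getD j 0 = pvCost (blocks.take j) := by
  rw [pvQ_eq]
  cases j with
  | zero => simp [pvCost]
  | succ j' =>
    simp only [List.getD_cons_succ]
    rw [pvQtail_getD blocks 0 j' (by omega)]
    omega

-- ---- the binary search, characterised ----

theorem pvBS_ge (Q : List Int) (bound : Int) (f : Nat) : ∀ (lo hi : Nat), lo ≤ pvBS Q bound f lo hi := by
  induction f with
  | zero => intro lo hi; rfl
  | succ f ih =>
    intro lo hi
    rw [pvBS]
    by_cases hlt : lo < hi
    · rw [if_pos hlt]
      by_cases hP : Q.getD ((lo + hi + 1) / 2) 0 ≤ bound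
      · simp only [hP, if_true]
        have := ih ((lo + hi + 1) / 2) hi
        omega
      · simp only [hP, if_false]
        exact ih lo _
    · rw [if_neg hlt]

theorem pvBS_spec (Q : List Int) (bound : Int) (f : Nat) : ∀ (lo hi : Nat), hi - lo ≤ f → lo ≤ hi →
    pvBS Q bound f lo hi ≤ hi ∧
      (lo < pvBS Q bound f lo hi → Q.getD (pvBS Q bound f lo hi) 0 ≤ bound) ∧
      (pvBS Q bound f lo hi < hi → ¬ Q.getD (pvBS Q bound f lo hi + 1) 0 ≤ bound) := by
  induction f with
  | zero =>
    intro lo hi hf h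
    have : lo = hi := by omega
    subst this
    have h0 : pvBS Q bound 0 lo lo = lo := rfl
    rw [h0]
    exact ⟨le_refl _, by omega, by omega⟩
  | succ f ih =>
    intro lo hi hf h
    rw [pvBS]
    by_cases hlt : lo < hi
    · rw [if_pos hlt]
      by_cases hP : Q.getD ((lo + hi + 1) / 2) 0 ≤ bound
      · simp only [hP, if_true]
        have hge := pvBS_ge Q bound f ((lo + hi + 1) / 2) hi
        obtain ⟨ih1, ih2, ih3⟩ := ih ((lo + hi + 1) / 2) hi (by omega) (by omega)
        refine ⟨ih1, ?_, ih3⟩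
        intro _
        rcases Nat.lt_or_ge ((lo + hi + 1) / 2) (pvBS Q bound f ((lo + hi + 1) / 2) hi) with hc | hc
        · exact ih2 hc
        · have : pvBS Q bound f ((lo + hi + 1) / 2) hi = (lo + hi + 1) / 2 := by omega
          rw [this]; exact hP
      · simp only [hP, if_false]
        have hge := pvBS_ge Q bound f lo ((lo + hi + 1) / 2 - 1)
        obtain ⟨ih1, ih2, ih3⟩ := ih lo ((lo + hi + 1) / 2 - 1) (by omega) (by omega)
        refine ⟨by omega, ih2, ?_⟩
        intro _
        rcases Nat.lt_or_ge (pvBS Q bound f lo ((lo + hi + 1) / 2 - 1)) ((lo + hi + 1) / 2 - 1) with hc | hc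
        · exact ih3 hc
        · have heq : pvBS Q bound f lo ((lo + hi + 1) / 2 - 1) = (lo + hi + 1) / 2 - 1 := by omega
          rw [heq]
          have : (lo + hi + 1) / 2 - 1 + 1 = (lo + hi + 1) / 2 := by omega
          rw [this]; exact hP
    · rw [if_neg hlt]
      exact ⟨by omega, by omega, by omega⟩

-- the binary search finds exactly the greedy page boundary
theorem pvCuts_bs (blocks : List String) (i : Nat) (hi : i < blocks.length) :
    pvBS (pvQ blocks) ((pvQ blocks).getD i 0 + PySem.Str.len pvSep + 3800)
        (blocks.length - (i + 1)) (i + 1) blocks.length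
      = i + 1 + pvFit (PySem.Str.len (blocks.getD i "")) (blocks.drop (i + 1)) := by
  set n := blocks.length with hn
  set b := blocks.getD i "" with hb
  set rest := blocks.drop (i + 1) with hrest
  set k := pvFit (PySem.Str.len b) rest with hk
  have hdropi : blocks.drop i = b :: rest := by
    rw [hb, hrest, List.getD_eq_getElem blocks "" hi]
    exact List.drop_eq_getElem_cons hi
  have hrestlen : rest.length = n - (i + 1) := by simp [hrest, hn]
  have hkle : k ≤ rest.length := pvFit_le_length _ _
  -- translate membership of Q j under the bound into the pvFit condition
  have hP : ∀ j : Nat, i + 1 ≤ j → j ≤ n →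
      ((pvQ blocks).getD j 0 ≤ (pvQ blocks).getD i 0 + PySem.Str.len pvSep + 3800 ↔
        PySem.Str.len b + pvCost (rest.take (j - i - 1)) ≤ 3800) := by
    intro j h1 h2
    rw [pvQ_getD blocks j h2, pvQ_getD blocks i (by omega)]
    have htake : blocks.take j = blocks.take i ++ b :: rest.take (j - i - 1) := by
      have hj : j = i + ((j - i - 1) + 1) := by omega
      conv_lhs => rw [hj, List.take_add]
      rw [hdropi, List.take_succ_cons]
    rw [htake]
    have hsplit : pvCost (blocks.take i ++ b :: rest.take (j - i - 1)) =
        pvCost (blocks.take i) + (PySem.Str.len b + PySem.Str.len pvSep) + pvCost (rest.take (j - i - 1)) := by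
      simp [pvCost]; ring
    rw [hsplit]
    omega
  have hge := pvBS_ge (pvQ blocks) ((pvQ blocks).getD i 0 + PySem.Str.len pvSep + 3800) (n - (i + 1)) (i + 1) n
  obtain ⟨h1, h2, h3⟩ := pvBS_spec (pvQ blocks) ((pvQ blocks).getD i 0 + PySem.Str.len pvSep + 3800)
    (n - (i + 1)) (i + 1) n (by omega) (by omega)
  set r := pvBS (pvQ blocks) ((pvQ blocks).getD i 0 + PySem.Str.len pvSep + 3800) (n - (i + 1)) (i + 1) n with hr
  -- r ≤ i + 1 + k
  have hub : r ≤ i + 1 + k := by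
    rcases Nat.lt_or_ge (i + 1) r with hc | hc
    · have hPr := (hP r (by omega) h1).mp (h2 hc)
      have := pvFit_ge (PySem.Str.len b) rest (r - i - 1) (by omega) (by omega)
      omega
    · omega
  -- i + 1 + k ≤ r
  have hlb : i + 1 + k ≤ r := by
    by_contra hcon
    have hrn : r < n := by omega
    have hm1 : 1 ≤ r + 1 - i - 1 := by omega
    have hm2 : r + 1 - i - 1 ≤ k := by omega
    have hfits := pvFit_fits (PySem.Str.len b) rest (r + 1 - i - 1) hm1 (by omega)
    exact (h3 hrn) ((hP (r + 1) (by omega) (by omega)).mpr (by omega))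
  omega

-- ---- cuts give exactly the greedy groups, as slices ----

theorem pvCuts_chunk (blocks : List String) : ∀ (fuel i : Nat), blocks.length - i ≤ fuel →
    (pvCuts (pvQ blocks) blocks.length fuel i).map
        (fun p => PySem.List.slice blocks (some (p.1 : Int)) (some (p.2 : Int)))
      = pvChunk (blocks.drop i) := by
  intro fuel
  induction fuel with
  | zero =>
    intro i hf
    rw [pvCuts, List.drop_eq_nil_of_le (by omega), pvChunk_nil]
    simp
  | succ fuel ih =>
    intro i hf
    by_cases hlt : i < blocks.length
    · rw [pvCuts, if_pos hlt]
      rw [pvCuts_bs blocks i hlt]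
      set b := blocks.getD i "" with hb
      set rest := blocks.drop (i + 1) with hrest
      set k := pvFit (PySem.Str.len b) rest with hk
      have hdropi : blocks.drop i = b :: rest := by
        rw [hb, hrest, List.getD_eq_getElem blocks "" hlt]
        exact List.drop_eq_getElem_cons hlt
      have hkle : k ≤ rest.length := pvFit_le_length _ _
      have hrestlen : rest.length = blocks.length - (i + 1) := by simp [hrest]
      rw [List.map_cons]
      have hslice : PySem.List.slice blocks (some ((i : Int))) (some ((i + 1 + k : Nat) : Int)) =
          b :: rest.take k := by
        rw [show (((i + 1 + k : Nat) : Int)) = ((i : Int) + ((k + 1 : Nat) : Int)) by push_cast; ring]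
        rw [PySem.List.slice_natCast_add, hdropi, List.take_succ_cons]
      have hrec := ih (i + 1 + k) (by omega)
      rw [hrec, hdropi, pvChunk_eq b rest, ← hk]
      have hdd : blocks.drop (i + 1 + k) = rest.drop k := by
        rw [hrest, List.drop_drop]
      rw [hdd, hslice]
    · rw [pvCuts, if_neg hlt]
      rw [List.drop_eq_nil_of_le (by omega), pvChunk_nil]
      simp

-- rendering commutes with mapping the group extractor over the cuts
theorem pv_enum_map {α β : Type} (f : α → β) (g : Int → β → String) :
    ∀ (xs : List α) (s : Int),
      (PySem.List.enumerate (xs.map f) s).map (fun p => g p.1 p.2)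
        = (PySem.List.enumerate xs s).map (fun p => g p.1 (f p.2)) := by
  intro xs
  induction xs with
  | nil => intro s; simp [PySem.List.enumerate_nil]
  | cons x xs ih => intro s; simp [PySem.List.enumerate_cons, ih]

theorem pvCuts_ne_nil (blocks : List String) (h : blocks ≠ []) :
    pvCuts (pvQ blocks) blocks.length blocks.length 0 ≠ [] := by
  cases blocks with
  | nil => exact absurd rfl h
  | cons a l =>
    simp only [List.length_cons]
    rw [pvCuts, if_pos (by omega)]
    simp

theorem pvAlt_eq (blocks : List String) (lang first_title : String) (h : blocks ≠ []) :
    paginate_order_blocks_py_alt blocks lang first_title =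
      pvRender lang first_title (pvChunk blocks) := by
  rw [paginate_order_blocks_py_alt]
  simp only [if_neg (pvCuts_ne_nil blocks h)]
  have hmap := pvCuts_chunk blocks blocks.length 0 (by omega)
  rw [List.drop_zero] at hmap
  rw [pvRender, ← hmap]
  rw [pv_enum_map (fun p : Nat × Nat => PySem.List.slice blocks (some (p.1 : Int)) (some (p.2 : Int)))
    (fun i s => (if i = 0 then first_title
                 else if lang = "uz" then "🔄 Davomi:" else "🔄 Продолжение:") ++ "\n\n" ++ PySem.Str.join pvSep s)
    (pvCuts (pvQ blocks) blocks.length blocks.length 0) 0]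

-- ===== VERDICT (by name: the statement is the Claim_ definition above) =====
theorem paginate_order_blocks_py_spec : Claim_equal_paginate_order_blocks_py := by
  intro blocks lang first_title _
  unfold Spec_paginate_order_blocks_py
  rcases blocks with _ | ⟨b, bs⟩
  · simp [paginate_order_blocks_py, paginate_order_blocks_py_alt, pvCuts]
  · rw [pvA_cons, pvAlt_eq _ _ _ (by simp)]
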